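-- pv_equiv track=rewrite | github.com/Amirjjf/Distributed-MoE-Systems | src/rebalance.py | build_deepspeed_ep_map
-- ===== SOURCE A (Python) =====
-- from typing import Any, Callable, Deque, Dict, List, Optional, Tuple, TypeVar
--
-- def build_initial_expert_map(num_experts: int, world_size: int) -> List[int]:
--     if world_size <= 0:
--         return [0 for _ in range(max(num_experts, 0))]
--     return [expert_id % world_size for expert_id in range(max(num_experts, 0))]
--
-- def build_deepspeed_ep_map(num_experts: int, ep_size: int) -> List[int]:
--     n = max(int(num_experts), 0)
--     if ep_size <= 0:
--         return [0 for _ in range(n)]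
--     if n == 0:
--         return []
--     if n % ep_size != 0:
--         return build_initial_expert_map(n, ep_size)
--
--     per_rank = n // ep_size
--     mapping = [0 for _ in range(n)]
--     for expert_id in range(n):
--         mapping[expert_id] = min(expert_id // per_rank, ep_size - 1)
--     return mapping
-- ===== SOURCE B (Python) =====
-- def build_deepspeed_ep_map(num_experts: int, ep_size: int):
--     n = max(int(num_experts), 0)
--     if ep_size <= 0:
--         return [0] * n
--     if n == 0:
--         return []
--     if n % ep_size != 0:
--         return [e % ep_size for e in range(n)]
--     per_rank = n // ep_size
--     mapping = []
--     for r in range(ep_size):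
--         mapping.extend([r] * per_rank)
--     return mapping
-- ===== Notes on version B (the rewrite author's own statement) =====
-- stated objective: simpler
-- what changed: The divisible branch builds the mapping rank-by-rank (per_rank copies of each rank appended in order) instead of allocating a zero list and overwriting every expert slot with a clamped floor division; the min clamp disappears because it can never fire when ep_size divides n.
import Mathlib
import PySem

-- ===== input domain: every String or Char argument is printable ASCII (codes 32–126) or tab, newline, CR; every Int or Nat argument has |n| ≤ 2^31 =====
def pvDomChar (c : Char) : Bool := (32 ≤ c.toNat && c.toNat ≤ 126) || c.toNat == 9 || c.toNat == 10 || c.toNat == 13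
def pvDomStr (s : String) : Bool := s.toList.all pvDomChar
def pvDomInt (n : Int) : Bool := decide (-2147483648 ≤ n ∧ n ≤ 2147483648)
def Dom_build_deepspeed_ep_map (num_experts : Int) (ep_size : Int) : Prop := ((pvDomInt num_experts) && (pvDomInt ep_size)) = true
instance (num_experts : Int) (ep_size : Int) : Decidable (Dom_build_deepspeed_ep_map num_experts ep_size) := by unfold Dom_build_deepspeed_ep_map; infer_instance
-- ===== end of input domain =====

-- B rebuilds the divisible branch rank-by-rank (per_rank copies of each rank), dropping the dead min clamp; objective: simpler.

-- ===== PORT A =====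
def build_initial_expert_map (num_experts : Int) (world_size : Int) : List Int :=
  if world_size ≤ 0 then
    (PySem.List.pyRange 0 (max num_experts 0) 1).map (fun _ => (0 : Int))
  else
    (PySem.List.pyRange 0 (max num_experts 0) 1).map (fun e => PySem.Int.mod e world_size)

def build_deepspeed_ep_map (num_experts : Int) (ep_size : Int) : List Int :=
  let n := max num_experts 0
  if ep_size ≤ 0 then
    (PySem.List.pyRange 0 n 1).map (fun _ => (0 : Int))
  else if n = 0 then
    []
  else if PySem.Int.mod n ep_size ≠ 0 then
    build_initial_expert_map n ep_size
  else
    let per_rank := PySem.Int.floordiv n ep_size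
    let mapping := (PySem.List.pyRange 0 n 1).map (fun _ => (0 : Int))
    (PySem.List.pyRange 0 n 1).foldl
      (fun m e => PySem.List.pySetD m e (min (PySem.Int.floordiv e per_rank) (ep_size - 1))) mapping

-- ===== PORT B =====
def build_deepspeed_ep_map_alt (num_experts : Int) (ep_size : Int) : List Int :=
  let n := max num_experts 0
  if ep_size ≤ 0 then
    PySem.List.pyRepeat [(0 : Int)] n
  else if n = 0 then
    []
  else if PySem.Int.mod n ep_size ≠ 0 then
    (PySem.List.pyRange 0 n 1).map (fun e => PySem.Int.mod e ep_size)
  else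
    let per_rank := PySem.Int.floordiv n ep_size
    (PySem.List.pyRange 0 ep_size 1).foldl
      (fun m r => m ++ PySem.List.pyRepeat [r] per_rank) []

-- ===== PRECONDITION & SPEC =====
def Spec_build_deepspeed_ep_map (num_experts : Int) (ep_size : Int) (out : List Int) : Prop := out = build_deepspeed_ep_map_alt num_experts ep_size
instance (num_experts : Int) (ep_size : Int) (out : List Int) : Decidable (Spec_build_deepspeed_ep_map num_experts ep_size out) := by unfold Spec_build_deepspeed_ep_map; infer_instance

-- ===== CLAIM (what is proved, stated in full; the proofs are below) =====
def Claim_equal_build_deepspeed_ep_map : Prop := ∀ (num_experts : Int) (ep_size : Int), Dom_build_deepspeed_ep_map num_experts ep_size → Spec_build_deepspeed_ep_map num_experts ep_size (build_deepspeed_ep_map num_experts ep_size)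

-- ===== LEMMAS AND PROOFS =====

-- A's write-each-slot loop over range N, started on any list of length ≥ N, writes f k at slot k.
theorem foldl_set_range (f : Nat → Int) (N : Nat) (init : List Int) (h : N ≤ init.length) :
    (List.range N).foldl (fun m k => m.set k (f k)) init
      = (List.range N).map (fun k => f k) ++ init.drop N := by
  induction N with
  | zero => simp
  | succ N ih =>
      rw [List.range_succ, List.foldl_append, ih (by omega)]
      simp only [List.foldl_cons, List.foldl_nil, List.map_append, List.map_cons, List.map_nil]
      have hlen : ((List.range N).map (fun k => f k)).length = N := by simp
      rw [List.set_append_right _ _ (by omega), hlen, Nat.sub_self]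
      have hd : init.drop N = init[N] :: init.drop (N + 1) := List.drop_eq_getElem_cons (by omega)
      rw [hd, List.set_cons_zero, List.append_assoc, List.singleton_append]

-- the block structure of floor division: k ↦ k / P over range (P*E) is E blocks of P equal values
theorem map_div_range (E P : Nat) :
    (List.range (P * E)).map (fun k => ((k / P : Nat) : Int))
      = (List.range E).flatMap (fun r => List.replicate P ((r : Nat) : Int)) := by
  induction E with
  | zero => simp
  | succ E ih =>
      have : P * (E + 1) = P * E + P := by ring
      rw [this, List.range_add, List.map_append, ih, List.range_succ, List.flatMap_append]
      congr 1
      simp only [List.flatMap_cons, List.flatMap_nil, List.append_nil, List.map_map]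
      rcases Nat.eq_zero_or_pos P with hP | hP
      · simp [hP]
      · rw [List.eq_replicate_iff]
        refine ⟨by simp, ?_⟩
        intro b hb
        simp only [List.mem_map, List.mem_range] at hb
        obtain ⟨j, hj, rfl⟩ := hb
        simp only [Function.comp]
        congr 1
        rw [Nat.mul_add_div hP, Nat.div_eq_of_lt hj]
        omega

theorem build_deepspeed_ep_map_eq (num_experts : Int) (ep_size : Int) :
    build_deepspeed_ep_map num_experts ep_size = build_deepspeed_ep_map_alt num_experts ep_size := by
  unfold build_deepspeed_ep_map build_deepspeed_ep_map_alt
  set n : Int := max num_experts 0 with hn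
  have hn0 : 0 ≤ n := le_max_right _ _
  by_cases h1 : ep_size ≤ 0
  · simp only [h1, if_pos]
    rw [PySem.List.pyRepeat_singleton, PySem.List.pyRange_one]
    simp [Function.comp_def]
  · simp only [h1, if_false]
    by_cases h2 : n = 0
    · simp [h2]
    · simp only [h2, if_false]
      by_cases h3 : PySem.Int.mod n ep_size = 0
      · -- divisible branch
        rw [if_neg (not_not_intro h3), if_neg (not_not_intro h3)]
        have hpos : 0 < ep_size := by omega
        have hnpos : 0 < n := lt_of_le_of_ne hn0 (Ne.symm h2)
        set per := PySem.Int.floordiv n ep_size with hper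
        have hdiv : per * ep_size + PySem.Int.mod n ep_size = n :=
          PySem.Int.floordiv_mul_add_mod n ep_size
        rw [h3, add_zero] at hdiv
        have hper0 : 0 < per := by nlinarith
        set E := ep_size.toNat with hE
        set P := per.toNat with hP
        have hEe : (E : Int) = ep_size := Int.toNat_of_nonneg (le_of_lt hpos)
        have hPe : (P : Int) = per := Int.toNat_of_nonneg (le_of_lt hper0)
        have hPpos : 0 < P := by omega
        have hN : n.toNat = P * E := by
          have : ((P * E : Nat) : Int) = n := by push_cast [hEe, hPe]; linarith [hdiv]
          omega
        rw [PySem.List.pyRange_one 0 n, PySem.List.pyRange_one 0 ep_size]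
        simp only [zero_add, sub_zero, List.foldl_map, List.map_map,
          PySem.List.pySetD_natCast, PySem.List.pyRepeat_singleton, ← hE, ← hP, hN]
        rw [foldl_set_range _ _ _ (by simp), PySem.List.foldl_append_eq_flatMap]
        have key : ∀ k ∈ List.range (P * E),
            min (PySem.Int.floordiv (k : Int) per) (ep_size - 1) = ((k / P : Nat) : Int) := by
          intro k hk
          rw [List.mem_range] at hk
          rw [← hPe, PySem.Int.floordiv_natCast]
          have hkE : k / P < E := (Nat.div_lt_iff_lt_mul hPpos).mpr (Nat.mul_comm P E ▸ hk)
          have hlt : ((k / P : Nat) : Int) < ep_size := by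
            rw [← hEe]; exact_mod_cast hkE
          have hle : ((k / P : Nat) : Int) ≤ ep_size - 1 := by omega
          rw [min_eq_left hle]
        rw [List.map_congr_left key, map_div_range, List.drop_eq_nil_of_le (by simp),
          List.append_nil, List.nil_append]
      · -- fallback (non-divisible) branch
        rw [if_pos h3, if_pos h3, build_initial_expert_map, if_neg h1, max_eq_left hn0]
-- ===== VERDICT (by name: the statement is the Claim_ definition above) =====
theorem build_deepspeed_ep_map_spec : Claim_equal_build_deepspeed_ep_map := by
  intro a b _
  exact build_deepspeed_ep_map_eq a b
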